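-- pv_equiv track=rewrite | github.com/lonevetad/TLN-dicaro | progetto/notebooks/utilities/synsetInfoExtraction.py | merge_weighted_bags
-- ===== SOURCE A (Python) =====
-- from typing import Dict, Iterable
--
-- def merge_weighted_bags(all_weighted_bags):
--     """
--     :param all_weighted_bags: iterable of map<string,int>, which are a map assigning an integer weight to some words (string)
--     :return: a huge map<string,int> merging all of the given ones. If some words are duplicated, the corresponding weights
--     are merged in some way (like performing a mean, or just a simple sum).
--     """
--     final_weighted_map: Dict[str:int] = {}  # {"can you spot me? :D": 0}
--     weights_collectors = {}
--     for wm in all_weighted_bags:  # per ogni dizionario (ergo, per ogni parola non-stop nella frase) ..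
--         if wm:
--             for wordd, weight in wm.items():  # scorro tutte le parole soppesate del dizionario
--                 # raccolgo i pesi in una collezione
--                 if wordd in weights_collectors:
--                     weights_collectors[wordd].append(weight)
--                 else:
--                     weights_collectors[wordd] = [weight]
--     all_weighted_maps = None  # clear the memory
--     # some sort of averaging ... like "arithmetic" ones
--     for wordd, weights in weights_collectors.items():
--         if len(weights) > 1:
--             # calculate the "mean"
--             # final_weighted_map[wordd] = float(sum(weights) / len(weights))
--             # ... or just the sum ...
--             final_weighted_map[wordd] = sum(weights)
--         else:
--             final_weighted_map[wordd] = weights[0]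
--     return final_weighted_map
-- ===== SOURCE B (Python) =====
-- def merge_weighted_bags(all_weighted_bags):
--     final_weighted_map = {}
--     for wm in all_weighted_bags:
--         for wordd, weight in wm.items():
--             final_weighted_map[wordd] = final_weighted_map.get(wordd, 0) + weight
--     return final_weighted_map
-- ===== Notes on version B (the rewrite author's own statement) =====
-- stated objective: simpler
-- what changed: Replaced A's two-phase design (build a word->list-of-weights collector dict, then a second loop summing each list) with a single streaming pass that accumulates an integer sum per word via final[w] = final.get(w, 0) + weight.
import Mathlib
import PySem

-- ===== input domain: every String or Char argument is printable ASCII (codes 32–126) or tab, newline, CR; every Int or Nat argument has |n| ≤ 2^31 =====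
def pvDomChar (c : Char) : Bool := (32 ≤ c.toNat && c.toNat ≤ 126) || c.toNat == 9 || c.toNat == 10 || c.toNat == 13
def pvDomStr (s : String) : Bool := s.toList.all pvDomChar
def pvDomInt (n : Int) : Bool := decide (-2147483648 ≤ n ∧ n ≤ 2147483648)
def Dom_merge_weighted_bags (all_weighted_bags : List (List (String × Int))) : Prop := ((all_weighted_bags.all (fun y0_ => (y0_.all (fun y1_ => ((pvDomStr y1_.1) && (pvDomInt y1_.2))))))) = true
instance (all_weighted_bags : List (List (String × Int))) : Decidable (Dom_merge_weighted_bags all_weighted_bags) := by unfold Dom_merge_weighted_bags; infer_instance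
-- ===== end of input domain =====

-- B replaces A's two-phase design (collect per-word weight lists, then sum them in a second
-- loop) with a single streaming pass that accumulates an integer sum per word; same cost.


-- ===== PORT A =====
-- phase 1: build weights_collectors (word -> list of weights), skipping empty bags
def mergeA_collect (all_weighted_bags : List (List (String × Int))) :
    PySem.Dict String (List Int) :=
  all_weighted_bags.foldl
    (fun wc wm =>
      if wm ≠ [] then
        wm.foldl
          (fun wc p =>
            if wc.contains p.1 then wc.modify p.1 [] (· ++ [p.2])
            else wc.insert p.1 [p.2])
          wc
      else wc)
    PySem.Dict.empty

-- phase 2: for each collected word, sum if >1 weight else take weights[0]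
-- (weights[0] is ported as pyGetD with default 0; every collected list is nonempty by construction)
def merge_weighted_bags (all_weighted_bags : List (List (String × Int))) : List (String × Int) :=
  ((mergeA_collect all_weighted_bags).items.foldl
    (fun fwm p =>
      if p.2.length > 1 then fwm.insert p.1 p.2.sum
      else fwm.insert p.1 (PySem.List.pyGetD p.2 0 0))
    (PySem.Dict.empty : PySem.Dict String Int)).items

-- ===== PORT B =====
def merge_weighted_bags_alt (all_weighted_bags : List (List (String × Int))) : List (String × Int) :=
  (all_weighted_bags.foldl
    (fun fwm wm =>
      wm.foldl (fun fwm p => fwm.insert p.1 (fwm.getD p.1 0 + p.2)) fwm)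
    (PySem.Dict.empty : PySem.Dict String Int)).items

-- ===== PRECONDITION & SPEC =====
def Spec_merge_weighted_bags (all_weighted_bags : List (List (String × Int))) (out : List (String × Int)) : Prop := out = merge_weighted_bags_alt all_weighted_bags
instance (all_weighted_bags : List (List (String × Int))) (out : List (String × Int)) : Decidable (Spec_merge_weighted_bags all_weighted_bags out) := by unfold Spec_merge_weighted_bags; infer_instance

-- ===== CLAIM (what is proved, stated in full; the proofs are below) =====
def Claim_equal_merge_weighted_bags : Prop := ∀ (all_weighted_bags : List (List (String × Int))), Dom_merge_weighted_bags all_weighted_bags → Spec_merge_weighted_bags all_weighted_bags (merge_weighted_bags all_weighted_bags)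

-- ===== LEMMAS AND PROOFS =====

-- the summed image of a collector dict
def sumDict (c : PySem.Dict String (List Int)) : PySem.Dict String Int :=
  PySem.Dict.mk (c.items.map (fun p => (p.1, p.2.sum)))

theorem keys_sumDict (c : PySem.Dict String (List Int)) : (sumDict c).keys = c.keys := by
  simp [sumDict, PySem.Dict.keys]

theorem contains_sumDict (c : PySem.Dict String (List Int)) (k : String) :
    (sumDict c).contains k = c.contains k := by
  rw [PySem.Dict.contains_eq_decide_mem_keys, PySem.Dict.contains_eq_decide_mem_keys,
    keys_sumDict]

theorem getD_sumDict (c : PySem.Dict String (List Int)) (k : String) :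
    (sumDict c).getD k 0 = (c.getD k []).sum := by
  obtain ⟨l⟩ := c
  induction l with
  | nil => simp [sumDict]; rfl
  | cons p t ih =>
    rw [PySem.Dict.getD_eq_get?_getD, PySem.Dict.getD_eq_get?_getD] at *
    simp only [sumDict, List.map_cons] at *
    rw [PySem.Dict.get?_mk_cons, PySem.Dict.get?_mk_cons]
    by_cases h : p.1 == k
    · simp [h]
    · simp only [h, Bool.false_eq_true, if_false]
      exact ih

theorem sumDict_insert (c : PySem.Dict String (List Int)) (k : String) (ws : List Int) :
    sumDict (c.insert k ws) = (sumDict c).insert k ws.sum := by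
  apply PySem.Dict.ext
  by_cases h : c.contains k
  · rw [sumDict, PySem.Dict.items_insert_of_contains _ _ h,
      PySem.Dict.items_insert_of_contains _ _ (by rw [contains_sumDict]; exact h)]
    simp only [sumDict, List.map_map]
    apply List.map_congr_left
    intro p _
    by_cases hk : p.1 = k <;> simp [hk]
  · rw [sumDict, PySem.Dict.items_insert_of_not_contains _ _ (by simp [h]),
      PySem.Dict.items_insert_of_not_contains _ _
        (by rw [contains_sumDict]; simp [h])]
    simp [sumDict]

-- one (word, weight) step: B's accumulate step tracks A's collect step through sumDict
theorem sumDict_step (c : PySem.Dict String (List Int)) (p : String × Int) :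
    (sumDict c).insert p.1 ((sumDict c).getD p.1 0 + p.2) =
      sumDict (if c.contains p.1 then c.modify p.1 [] (· ++ [p.2]) else c.insert p.1 [p.2]) := by
  by_cases h : c.contains p.1
  · have hm : c.modify p.1 [] (· ++ [p.2]) = c.insert p.1 (c.getD p.1 [] ++ [p.2]) := rfl
    rw [if_pos h, hm, sumDict_insert, getD_sumDict]
    simp
  · rw [if_neg h, sumDict_insert, getD_sumDict,
      PySem.Dict.getD_of_not_contains _ _ (by simpa using h)]
    simp

-- a whole bag
theorem sumDict_bag (wm : List (String × Int)) (c : PySem.Dict String (List Int)) :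
    wm.foldl (fun fwm p => fwm.insert p.1 (fwm.getD p.1 0 + p.2)) (sumDict c) =
      sumDict (wm.foldl
        (fun wc p => if wc.contains p.1 then wc.modify p.1 [] (· ++ [p.2])
                     else wc.insert p.1 [p.2]) c) := by
  induction wm generalizing c with
  | nil => rfl
  | cons p t ih =>
    simp only [List.foldl_cons]
    rw [sumDict_step, ih]

-- B's whole dict is the summed image of A's collector dict
theorem alt_eq_sumDict_collect (all_weighted_bags : List (List (String × Int))) :
    all_weighted_bags.foldl
      (fun fwm wm => wm.foldl (fun fwm p => fwm.insert p.1 (fwm.getD p.1 0 + p.2)) fwm)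
      (PySem.Dict.empty : PySem.Dict String Int) =
      sumDict (mergeA_collect all_weighted_bags) := by
  have hemp : (PySem.Dict.empty : PySem.Dict String Int) = sumDict PySem.Dict.empty := rfl
  rw [hemp, mergeA_collect]
  generalize (PySem.Dict.empty : PySem.Dict String (List Int)) = c
  induction all_weighted_bags generalizing c with
  | nil => rfl
  | cons wm t ih =>
    simp only [List.foldl_cons]
    rw [sumDict_bag]
    by_cases h : wm = []
    · simp only [h, ne_eq, not_true_eq_false, ite_false, List.foldl_nil]
      exact ih c
    · simp only [h, ne_eq, not_false_eq_true, ite_true]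
      exact ih _

-- A's phase-2 branch always inserts the sum: for a singleton list [x], sum = x = weights[0];
-- for [] both are 0 (unreachable anyway)
theorem phase2_step (fwm : PySem.Dict String Int) (p : String × List Int) :
    (if p.2.length > 1 then fwm.insert p.1 p.2.sum
     else fwm.insert p.1 (PySem.List.pyGetD p.2 0 0)) = fwm.insert p.1 p.2.sum := by
  obtain ⟨k, ws⟩ := p
  match ws with
  | [] => simp [PySem.List.pyGetD, PySem.List.pyGet?, PySem.List.pyIdx?]
  | [x] => simp [PySem.List.pyGetD, PySem.List.pyGet?, PySem.List.pyIdx?]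
  | x :: y :: t => simp

-- A's collector dict has Nodup keys
theorem nodup_keys_collect (all_weighted_bags : List (List (String × Int))) :
    (mergeA_collect all_weighted_bags).keys.Nodup := by
  rw [mergeA_collect]
  generalize h0 : (PySem.Dict.empty : PySem.Dict String (List Int)) = c
  have hc : c.keys.Nodup := by rw [← h0]; exact PySem.Dict.nodup_keys_empty
  clear h0
  induction all_weighted_bags generalizing c with
  | nil => exact hc
  | cons wm t ih =>
    simp only [List.foldl_cons]
    by_cases h : wm = []
    · simp only [h, ne_eq, not_true_eq_false, ite_false]
      exact ih c hc
    · simp only [h, ne_eq, not_false_eq_true, ite_true]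
      apply ih
      -- inner loop: insert/modify keyed by p.1 keeps keys Nodup
      have : ∀ (l : List (String × Int)) (d : PySem.Dict String (List Int)),
          d.keys.Nodup →
          (l.foldl (fun wc p => if wc.contains p.1 then wc.modify p.1 [] (· ++ [p.2])
                                else wc.insert p.1 [p.2]) d).keys.Nodup := by
        intro l
        induction l with
        | nil => intro d hd; exact hd
        | cons q r ihr =>
          intro d hd
          simp only [List.foldl_cons]
          apply ihr
          by_cases hq : d.contains q.1
          · rw [if_pos hq]
            have hm : d.modify q.1 [] (· ++ [q.2]) = d.insert q.1 (d.getD q.1 [] ++ [q.2]) := rfl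
            rw [hm]
            exact PySem.Dict.nodup_keys_insert _ _ _ hd
          · rw [if_neg hq]
            exact PySem.Dict.nodup_keys_insert _ _ _ hd
      exact this wm c hc

-- rebuilding a Nodup-keyed dict entry by entry from empty reproduces it
theorem foldl_insert_items (d : PySem.Dict String Int) (hd : d.keys.Nodup) :
    d.items.foldl (fun fwm p => fwm.insert p.1 p.2) (PySem.Dict.empty : PySem.Dict String Int)
      = d := by
  apply PySem.Dict.ext
  rw [PySem.Dict.items_foldl_insert_fresh d.items (fun p => p.1) (fun p => p.2)
    PySem.Dict.empty (fun a _ => PySem.Dict.contains_empty _) hd]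
  simp [PySem.Dict.empty]

-- ===== VERDICT (by name: the statement is the Claim_ definition above) =====
theorem merge_weighted_bags_spec : Claim_equal_merge_weighted_bags := by
  intro bags _
  unfold Spec_merge_weighted_bags merge_weighted_bags merge_weighted_bags_alt
  rw [alt_eq_sumDict_collect]
  congr 1
  have hstep : ∀ (l : List (String × List Int)) (f : PySem.Dict String Int),
      l.foldl (fun fwm p => if p.2.length > 1 then fwm.insert p.1 p.2.sum
               else fwm.insert p.1 (PySem.List.pyGetD p.2 0 0)) f =
      l.foldl (fun fwm p => fwm.insert p.1 (p.1, p.2.sum).2) f := by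
    intro l f
    simp only [phase2_step]
  rw [hstep]
  -- phase 2 rebuilds sumDict (mergeA_collect bags) entry by entry
  have hnod : (sumDict (mergeA_collect bags)).keys.Nodup := by
    rw [keys_sumDict]; exact nodup_keys_collect bags
  have hitems : (sumDict (mergeA_collect bags)).items =
      (mergeA_collect bags).items.map (fun p => (p.1, p.2.sum)) := rfl
  calc (mergeA_collect bags).items.foldl (fun fwm p => fwm.insert (p.1, p.2.sum).1 (p.1, p.2.sum).2)
        (PySem.Dict.empty : PySem.Dict String Int)
      = ((mergeA_collect bags).items.map (fun p => (p.1, p.2.sum))).foldl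
        (fun fwm p => fwm.insert p.1 p.2) (PySem.Dict.empty : PySem.Dict String Int) := by
        rw [List.foldl_map]
    _ = sumDict (mergeA_collect bags) := by
        rw [← hitems]
        exact foldl_insert_items _ hnod
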